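-- pv_equiv track=rewrite | github.com/Rheology-and-Processing-of-Soft-Matter/RPSM_MuDRaW_v5.7 | Read_viscosity_v3.py | _trim_leading_empty_columns
-- ===== SOURCE A (Python) =====
-- from typing import List, Tuple, Optional, Dict
--
-- def _trim_leading_empty_columns(rows: List[List[str]], sample_rows: int = 20) -> List[List[str]]:
--     """Remove leading columns that are entirely empty (or "[]") across the first `sample_rows` lines.
--     This handles the common Anton Paar case where the first column is blank.
--     """
--     if not rows:
--         return rows
--     maxw = max((len(r) for r in rows), default=0)
--     start_col = 0
--     for j in range(maxw):
--         all_empty = True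
--         for r in rows[: min(len(rows), sample_rows)]:
--             if j < len(r):
--                 s = str(r[j]).strip()
--                 if s not in ("", "[]"):
--                     all_empty = False
--                     break
--         if all_empty:
--             start_col += 1
--         else:
--             break
--     if start_col > 0:
--         return [r[start_col:] for r in rows]
--     return rows
-- ===== SOURCE B (Python) =====
-- from typing import List
--
-- def _trim_leading_empty_columns(rows: List[List[str]], sample_rows: int = 20) -> List[List[str]]:
--     """Remove leading columns that are entirely empty (or "[]") across the first `sample_rows` lines."""
--     if not rows:
--         return rows
--     maxw = max((len(r) for r in rows), default=0)
--     firsts = []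
--     for r in rows[: min(len(rows), sample_rows)]:
--         for i, c in enumerate(r):
--             if str(c).strip() not in ("", "[]"):
--                 firsts.append(i)
--                 break
--     start_col = min(firsts, default=maxw)
--     if start_col > 0:
--         return [r[start_col:] for r in rows]
--     return rows
-- ===== Notes on version B (the rewrite author's own statement) =====
-- stated objective: alternative
-- what changed: A scans column-by-column (for each column index up to maxw, re-scanning all sampled rows and counting consecutive all-empty columns); B makes one pass over the sampled rows, records each row's first non-blank cell index, and takes the minimum of those indices (maxw if none).
import Mathlib
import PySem

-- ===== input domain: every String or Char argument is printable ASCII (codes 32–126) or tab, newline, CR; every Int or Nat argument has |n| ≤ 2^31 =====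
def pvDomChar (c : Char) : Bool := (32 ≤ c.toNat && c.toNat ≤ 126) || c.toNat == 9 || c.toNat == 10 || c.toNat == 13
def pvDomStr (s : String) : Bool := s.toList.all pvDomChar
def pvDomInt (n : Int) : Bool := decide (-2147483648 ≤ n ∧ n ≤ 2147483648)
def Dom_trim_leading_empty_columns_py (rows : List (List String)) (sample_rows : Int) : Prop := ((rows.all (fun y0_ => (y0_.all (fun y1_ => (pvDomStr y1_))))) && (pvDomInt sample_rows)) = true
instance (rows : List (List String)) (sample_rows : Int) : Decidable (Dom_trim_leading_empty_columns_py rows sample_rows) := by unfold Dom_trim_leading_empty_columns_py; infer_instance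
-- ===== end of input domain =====

-- B replaces A's column-by-column scan (for each column, scan the sampled rows) by one pass over the
-- sampled rows taking the minimum of each row's first non-blank index; objective: alternative decomposition.

-- helpers shared by both ports (the corresponding Python lines are textually identical in A and B):
-- s = str(cell).strip(); s in ("", "[]")
def pvBlank (c : String) : Bool := PySem.Str.strip c == "" || PySem.Str.strip c == "[]"
-- maxw = max((len(r) for r in rows), default=0)
def pvMaxw (rows : List (List String)) : Int :=
  PySem.List.maxD (rows.map (fun r => (r.length : Int))) (fun x => x) 0
-- rows[: min(len(rows), sample_rows)]
def pvSampled (rows : List (List String)) (sample_rows : Int) : List (List String) :=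
  PySem.List.slice rows none (some (min (rows.length : Int) sample_rows))

-- ===== PORT A =====
-- inner loop: all_empty stays true unless some sampled row has a non-blank cell in column j (break = all short-circuit)
def pvColEmpty (sampled : List (List String)) (j : Int) : Bool :=
  sampled.all (fun r => if j < (r.length : Int) then pvBlank (PySem.List.pyGetD r j "") else true)

-- outer loop: for j in range(maxw): if all_empty: start_col += 1 else: break
def pvTrimLoop (sampled : List (List String)) : List Int → Int → Int
  | [], sc => sc
  | j :: js, sc => if pvColEmpty sampled j then pvTrimLoop sampled js (sc + 1) else sc

def trim_leading_empty_columns_py (rows : List (List String)) (sample_rows : Int) : List (List String) :=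
  if rows.isEmpty then rows
  else
    let start_col := pvTrimLoop (pvSampled rows sample_rows) (PySem.List.pyRange 0 (pvMaxw rows) 1) 0
    if start_col > 0 then rows.map (fun r => PySem.List.slice r (some start_col) none) else rows

-- ===== PORT B =====
-- for i, c in enumerate(r): if non-blank: yield i; break
def pvFirstNB : List String → Int → Option Int
  | [], _ => none
  | c :: cs, i => if pvBlank c then pvFirstNB cs (i + 1) else some i

-- firsts: the first non-blank index of each sampled row that has one
def pvFirsts (rows : List (List String)) (sample_rows : Int) : List Int :=
  (pvSampled rows sample_rows).filterMap (fun r => pvFirstNB r 0)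

def trim_leading_empty_columns_py_alt (rows : List (List String)) (sample_rows : Int) : List (List String) :=
  if rows.isEmpty then rows
  else
    let start_col :=
      match PySem.List.min? (pvFirsts rows sample_rows) (fun x => x) with
      | some m => m
      | none => pvMaxw rows
    if start_col > 0 then rows.map (fun r => PySem.List.slice r (some start_col) none) else rows

-- ===== PRECONDITION & SPEC =====
def Spec_trim_leading_empty_columns_py (rows : List (List String)) (sample_rows : Int) (out : List (List String)) : Prop := out = trim_leading_empty_columns_py_alt rows sample_rows
instance (rows : List (List String)) (sample_rows : Int) (out : List (List String)) : Decidable (Spec_trim_leading_empty_columns_py rows sample_rows out) := by unfold Spec_trim_leading_empty_columns_py; infer_instance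

-- ===== CLAIM (what is proved, stated in full; the proofs are below) =====
def Claim_equal_trim_leading_empty_columns_py : Prop := ∀ (rows : List (List String)) (sample_rows : Int), Dom_trim_leading_empty_columns_py rows sample_rows → Spec_trim_leading_empty_columns_py rows sample_rows (trim_leading_empty_columns_py rows sample_rows)

-- ===== LEMMAS AND PROOFS =====

-- pvFirstNB is findIdx? of the non-blank predicate, shifted by the start index
theorem pvFirstNB_eq_findIdx? (r : List String) (i : Int) :
    pvFirstNB r i = (List.findIdx? (fun c => !pvBlank c) r).map (fun k : Nat => i + (k : Int)) := by
  induction r generalizing i with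
  | nil => rfl
  | cons c cs ih =>
    simp only [pvFirstNB, List.findIdx?_cons]
    by_cases hc : pvBlank c
    · rw [if_pos hc, if_neg (by simp [hc]), ih (i + 1)]
      cases List.findIdx? (fun c => !pvBlank c) cs with
      | none => rfl
      | some k => simp; ring
    · rw [if_neg hc, if_pos (by simp [hc])]
      simp

theorem pvFirstNB_none {r : List String} (h : pvFirstNB r 0 = none) :
    ∀ c ∈ r, pvBlank c = true := by
  rw [pvFirstNB_eq_findIdx?] at h
  cases hf : List.findIdx? (fun c => !pvBlank c) r with
  | none =>
    rw [List.findIdx?_eq_none_iff] at hf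
    intro c hc
    simpa using hf c hc
  | some k => rw [hf] at h; simp at h

theorem pvFirstNB_some {r : List String} {m : Int} (h : pvFirstNB r 0 = some m) :
    ∃ k : Nat, m = (k : Int) ∧ ∃ hk : k < r.length,
      pvBlank r[k] = false ∧ ∀ j : Nat, (hj : j < r.length) → j < k → pvBlank r[j] = true := by
  rw [pvFirstNB_eq_findIdx?] at h
  cases hf : List.findIdx? (fun c => !pvBlank c) r with
  | none => rw [hf] at h; simp at h
  | some k =>
    rw [hf] at h
    simp at h
    rw [List.findIdx?_eq_some_iff_getElem] at hf
    obtain ⟨hlt, hnb, hbefore⟩ := hf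
    refine ⟨k, by omega, hlt, by simpa using hnb, ?_⟩
    intro j hj hjk
    have := hbefore j hjk
    simpa using this

-- maxw bounds: nonnegative, and an upper bound for every row length
theorem pvMaxw_spec {rows : List (List String)} (h : rows ≠ []) :
    0 ≤ pvMaxw rows ∧ ∀ r ∈ rows, (r.length : Int) ≤ pvMaxw rows := by
  unfold pvMaxw PySem.List.maxD
  cases hm : PySem.List.max? (rows.map (fun r => (r.length : Int))) (fun x => x) with
  | none =>
    rw [PySem.List.max?_eq_none_iff] at hm
    simp at hm
    exact absurd hm h
  | some m =>
    have hmem := PySem.List.max?_mem hm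
    have hmax := PySem.List.max?_isMax hm
    simp only [List.mem_map] at hmem
    obtain ⟨r, _, hr⟩ := hmem
    constructor
    · simp only [Option.getD_some]; omega
    · intro r' hr'
      simpa using hmax _ (List.mem_map_of_mem hr')

-- the loop of A counts columns 0,1,… up to the first non-empty column M (or the end of the range)
theorem pvTrimLoop_eq : ∀ (n : Nat) (sampled : List (List String)) (a b M sc : Int),
    (b - a).toNat = n → a ≤ M → M ≤ b →
    (∀ j : Int, a ≤ j → j < M → pvColEmpty sampled j = true) →
    (M < b → pvColEmpty sampled M = false) →
    pvTrimLoop sampled (PySem.List.pyRange a b 1) sc = sc + (M - a)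
  | 0, sampled, a, b, M, sc, hn, h1, h2, _, _ => by
    have hba : b ≤ a := by omega
    rw [PySem.List.pyRange_one_eq_nil hba]
    have : M = a := by omega
    simp [pvTrimLoop, this]
  | n + 1, sampled, a, b, M, sc, hn, h1, h2, hall, hstop => by
    have hab : a < b := by omega
    rw [PySem.List.pyRange_one_cons hab]
    simp only [pvTrimLoop]
    by_cases hM : M = a
    · have : pvColEmpty sampled a = false := by
        have := hstop (by omega)
        rwa [hM] at this
      simp [this, hM]
    · have haM : a < M := by omega
      have hc : pvColEmpty sampled a = true := hall a le_rfl haM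
      have := pvTrimLoop_eq n sampled (a + 1) b M (sc + 1) (by omega) (by omega) h2
        (fun j hja hjM => hall j (by omega) hjM) hstop
      rw [if_pos hc, this]; ring

-- every sampled row is a row, so its length is bounded by maxw
theorem pvSampled_mem {rows : List (List String)} {sample_rows : Int} {r : List String}
    (h : r ∈ pvSampled rows sample_rows) : r ∈ rows :=
  PySem.List.mem_of_mem_slice rows _ _ h

-- the central fact: A's start_col equals B's start_col
theorem start_col_eq (rows : List (List String)) (sample_rows : Int) (hne : rows ≠ []) :
    pvTrimLoop (pvSampled rows sample_rows) (PySem.List.pyRange 0 (pvMaxw rows) 1) 0 =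
      (match PySem.List.min? (pvFirsts rows sample_rows) (fun x => x) with
       | some m => m
       | none => pvMaxw rows) := by
  obtain ⟨hmw0, hmwmax⟩ := pvMaxw_spec hne
  set sampled := pvSampled rows sample_rows with hsam
  set M : Int := (match PySem.List.min? (pvFirsts rows sample_rows) (fun x => x) with
       | some m => m
       | none => pvMaxw rows) with hM
  -- bounds on M
  have hbounds : 0 ≤ M ∧ M ≤ pvMaxw rows := by
    rw [hM]
    cases hmin : PySem.List.min? (pvFirsts rows sample_rows) (fun x => x) with
    | none => simp [hmw0]
    | some m =>
      have hmem := PySem.List.min?_mem hmin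
      simp only [pvFirsts, List.mem_filterMap] at hmem
      obtain ⟨r, hr, hfr⟩ := hmem
      obtain ⟨k, hk, hklt, _, _⟩ := pvFirstNB_some hfr
      have hlen := hmwmax r (pvSampled_mem hr)
      simp only
      constructor
      · omega
      · omega
  -- every column strictly before M is all-empty
  have hall : ∀ j : Int, 0 ≤ j → j < M → pvColEmpty sampled j = true := by
    intro j hj0 hjM
    simp only [pvColEmpty, List.all_eq_true]
    intro r hr
    by_cases hlen : j < (r.length : Int)
    · rw [if_pos hlen]
      rw [PySem.List.pyGetD_eq_getElem r "" hj0 hlen]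
      cases hfr : pvFirstNB r 0 with
      | none => exact pvFirstNB_none hfr _ (List.getElem_mem _)
      | some m' =>
        -- m' ∈ firsts, so M ≤ m', so j.toNat < m''s index, hence blank
        have hmemf : m' ∈ pvFirsts rows sample_rows := by
          simp only [pvFirsts, List.mem_filterMap]
          exact ⟨r, hr, hfr⟩
        have hMle : M ≤ m' := by
          cases hmin : PySem.List.min? (pvFirsts rows sample_rows) (fun x => x) with
          | none =>
            rw [PySem.List.min?_eq_none_iff] at hmin
            rw [hmin] at hmemf
            simp at hmemf
          | some mm =>
            have := PySem.List.min?_isMin hmin m' hmemf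
            simp only [hM, hmin]
            simpa using this
        obtain ⟨k, hk, hklt, _, hbefore⟩ := pvFirstNB_some hfr
        exact hbefore j.toNat (by omega) (by omega)
    · rw [if_neg hlen]
  -- at column M (when it exists) some sampled row is non-blank
  have hstop : M < pvMaxw rows → pvColEmpty sampled M = false := by
    intro hMlt
    cases hmin : PySem.List.min? (pvFirsts rows sample_rows) (fun x => x) with
    | none => rw [hM] at hMlt ⊢; rw [hmin] at hMlt; simp at hMlt
    | some m =>
      have hMm : M = m := by rw [hM, hmin]
      have hmem := PySem.List.min?_mem hmin
      simp only [pvFirsts, List.mem_filterMap] at hmem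
      obtain ⟨r, hr, hfr⟩ := hmem
      obtain ⟨k, hk, hklt, hnb, _⟩ := pvFirstNB_some hfr
      simp only [pvColEmpty, List.all_eq_false]
      refine ⟨r, hr, ?_⟩
      have hlen : M < (r.length : Int) := by omega
      rw [if_pos hlen]
      rw [PySem.List.pyGetD_eq_getElem r "" (by omega) hlen]
      have : M.toNat = k := by omega
      simp [this, hnb]
  have := pvTrimLoop_eq (pvMaxw rows).toNat sampled 0 (pvMaxw rows) M 0
    (by omega) hbounds.1 hbounds.2 hall hstop
  rw [this]; omega

-- ===== VERDICT (by name: the statement is the Claim_ definition above) =====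
theorem trim_leading_empty_columns_py_spec : Claim_equal_trim_leading_empty_columns_py := by
  unfold Claim_equal_trim_leading_empty_columns_py
  intro rows sample_rows _
  unfold Spec_trim_leading_empty_columns_py
  unfold trim_leading_empty_columns_py trim_leading_empty_columns_py_alt
  by_cases h : rows.isEmpty
  · simp [h]
  · have hne : rows ≠ [] := by simpa [List.isEmpty_iff] using h
    rw [if_neg h, if_neg h]
    rw [start_col_eq rows sample_rows hne]
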